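-- pv_equiv track=rewrite | github.com/AAD23110162/Python-Engineering-Playbook-IA-II | Enfoque_1-busqueda_de_grafos/032-E1-teoria_juegos.py | mejores_respuestas
-- ===== SOURCE A (Python) =====
-- def mejores_respuestas(matriz_pagos, jugador, otras_estrategias):
--     """
--     Dada la matriz de pagos, devuelve para un jugador las mejores respuestas
--     frente a cada combinación de la(s) otra(s) estrategia(s).
--     :parametro matriz_pagos: dict (estr1, estr2) -> (pago_jugador1, pago_jugador2)
--     :parametro jugador: 1 o 2
--     :parametro otras_estrategias: lista de posibles estrategias del otro jugador
--     :return: dict mapa de estr_otros -> lista de mejores respuestas para jugador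
--     """
--     # Diccionario para almacenar las mejores respuestas: estrategia_oponente -> [mejores_estrategias]
--     respuestas = {}
--
--     # Extraer todas las estrategias únicas de cada jugador de las claves de la matriz
--     estrategias_j1 = sorted({e1 for (e1, _) in matriz_pagos.keys()})
--     estrategias_j2 = sorted({e2 for (_, e2) in matriz_pagos.keys()})
--
--     # Calcular mejores respuestas según el jugador especificado
--     if jugador == 1:
--         # Para el Jugador 1: encontrar la mejor estrategia frente a cada estrategia del Jugador 2
--         for e2 in otras_estrategias:
--             max_pago = float('-inf')  # Inicializar con el peor pago posible
--             mejores = []  # Lista de estrategias que dan el mejor pago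
--
--             # Revisar todas las estrategias posibles del Jugador 1
--             for e1 in estrategias_j1:
--                 # Obtener el pago del Jugador 1 para esta combinación (índice 0)
--                 pago = matriz_pagos[(e1, e2)][0]
--
--                 # Si encontramos un pago mejor, reiniciar la lista de mejores estrategias
--                 if pago > max_pago:
--                     max_pago = pago
--                     mejores = [e1]
--                 # Si el pago es igual al mejor, agregar a la lista (pueden haber empates)
--                 elif pago == max_pago:
--                     mejores.append(e1)
--
--             # Guardar las mejores respuestas para esta estrategia del Jugador 2
--             respuestas[e2] = mejores
--     else:
--         # Para el Jugador 2: encontrar la mejor estrategia frente a cada estrategia del Jugador 1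
--         for e1 in otras_estrategias:
--             max_pago = float('-inf')  # Inicializar con el peor pago posible
--             mejores = []  # Lista de estrategias que dan el mejor pago
--
--             # Revisar todas las estrategias posibles del Jugador 2
--             for e2 in estrategias_j2:
--                 # Obtener el pago del Jugador 2 para esta combinación (índice 1)
--                 pago = matriz_pagos[(e1, e2)][1]
--
--                 # Si encontramos un pago mejor, reiniciar la lista de mejores estrategias
--                 if pago > max_pago:
--                     max_pago = pago
--                     mejores = [e2]
--                 # Si el pago es igual al mejor, agregar a la lista (pueden haber empates)
--                 elif pago == max_pago:
--                     mejores.append(e2)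
--
--             # Guardar las mejores respuestas para esta estrategia del Jugador 1
--             respuestas[e1] = mejores
--
--     return respuestas
-- ===== SOURCE B (Python) =====
-- def mejores_respuestas(matriz_pagos, jugador, otras_estrategias):
--     # Simpler decomposition: pick the player's strategy set and payoff accessor up
--     # front (one unified code path), then per opponent strategy do three plain
--     # passes: map payoffs, take max, filter the argmax strategies.
--     if jugador == 1:
--         propias = sorted({e1 for (e1, _) in matriz_pagos.keys()})
--         pago = lambda mia, otra: matriz_pagos[(mia, otra)][0]
--     else:
--         propias = sorted({e2 for (_, e2) in matriz_pagos.keys()})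
--         pago = lambda mia, otra: matriz_pagos[(otra, mia)][1]
--     respuestas = {}
--     for otra in otras_estrategias:
--         pagos = [pago(mia, otra) for mia in propias]
--         if pagos:
--             tope = max(pagos)
--             respuestas[otra] = [mia for mia, p in zip(propias, pagos) if p == tope]
--         else:
--             respuestas[otra] = []
--     return respuestas
-- ===== Notes on version B (the rewrite author's own statement) =====
-- stated objective: simpler
-- what changed: Replaces the two duplicated player branches with a single loop after selecting the strategy set and payoff index up front, and replaces the fused running-max/reset-list accumulator with three plain passes per opponent strategy: map the payoffs, take max(), filter the strategies attaining it.
import Mathlib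
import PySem

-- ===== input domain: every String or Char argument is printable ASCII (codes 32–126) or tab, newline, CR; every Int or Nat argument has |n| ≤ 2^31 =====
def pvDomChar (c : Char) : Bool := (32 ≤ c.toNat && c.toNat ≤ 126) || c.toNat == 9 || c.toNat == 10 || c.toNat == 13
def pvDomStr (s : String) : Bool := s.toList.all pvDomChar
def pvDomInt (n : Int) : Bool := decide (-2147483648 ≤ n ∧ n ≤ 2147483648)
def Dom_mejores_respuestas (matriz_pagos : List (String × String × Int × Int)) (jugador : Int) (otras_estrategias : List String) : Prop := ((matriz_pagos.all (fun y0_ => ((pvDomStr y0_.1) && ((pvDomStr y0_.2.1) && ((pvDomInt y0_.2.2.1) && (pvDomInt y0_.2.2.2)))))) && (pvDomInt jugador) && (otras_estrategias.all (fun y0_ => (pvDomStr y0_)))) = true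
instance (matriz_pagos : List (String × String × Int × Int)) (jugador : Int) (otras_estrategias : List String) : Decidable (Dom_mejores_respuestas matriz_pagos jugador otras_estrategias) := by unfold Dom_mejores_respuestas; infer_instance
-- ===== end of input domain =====

-- B unifies the two player branches (payoff index / strategy set chosen up front) and
-- replaces A's fused running-max/reset loop by map-payoffs, max, filter (objective: simpler).

-- dict lookup matriz_pagos[(a, b)] on the association list (first match); total form
-- via getD, used ONLY under Pre_ (where the key is present)
def pvLookup (m : List (String × String × Int × Int)) (a b : String) : Option (Int × Int) :=
  (m.find? (fun r => r.1 == a && r.2.1 == b)).map (fun r => (r.2.2.1, r.2.2.2))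

-- ===== PORT A =====
def mejores_respuestas (matriz_pagos : List (String × String × Int × Int)) (jugador : Int) (otras_estrategias : List String) : List (String × List String) :=
  let estrategias_j1 := PySem.List.sorted (PySem.Set.ofList (matriz_pagos.map (·.1))) (fun x => x) false
  let estrategias_j2 := PySem.List.sorted (PySem.Set.ofList (matriz_pagos.map (·.2.1))) (fun x => x) false
  if jugador = 1 then
    (otras_estrategias.foldl (fun (respuestas : PySem.Dict String (List String)) e2 =>
      -- max_pago = float('-inf') modelled as none (below every int)
      let st := estrategias_j1.foldl (fun (st : Option Int × List String) e1 =>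
        let pago := ((pvLookup matriz_pagos e1 e2).getD (0, 0)).1
        match st with
        | (none, _) => (some pago, [e1])
        | (some v, mejores) =>
          if pago > v then (some pago, [e1])
          else if pago = v then (some v, mejores ++ [e1])
          else (some v, mejores)) (none, [])
      respuestas.insert e2 st.2) PySem.Dict.empty).items
  else
    (otras_estrategias.foldl (fun (respuestas : PySem.Dict String (List String)) e1 =>
      let st := estrategias_j2.foldl (fun (st : Option Int × List String) e2 =>
        let pago := ((pvLookup matriz_pagos e1 e2).getD (0, 0)).2
        match st with
        | (none, _) => (some pago, [e2])
        | (some v, mejores) =>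
          if pago > v then (some pago, [e2])
          else if pago = v then (some v, mejores ++ [e2])
          else (some v, mejores)) (none, [])
      respuestas.insert e1 st.2) PySem.Dict.empty).items

-- ===== PORT B =====
def mejores_respuestas_alt (matriz_pagos : List (String × String × Int × Int)) (jugador : Int) (otras_estrategias : List String) : List (String × List String) :=
  let propias := if jugador = 1
    then PySem.List.sorted (PySem.Set.ofList (matriz_pagos.map (·.1))) (fun x => x) false
    else PySem.List.sorted (PySem.Set.ofList (matriz_pagos.map (·.2.1))) (fun x => x) false
  let pago : String → String → Int := fun mia otra =>
    if jugador = 1 then ((pvLookup matriz_pagos mia otra).getD (0, 0)).1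
    else ((pvLookup matriz_pagos otra mia).getD (0, 0)).2
  (otras_estrategias.foldl (fun (respuestas : PySem.Dict String (List String)) otra =>
      let pagos := propias.map (fun mia => pago mia otra)
      match PySem.List.max? pagos (fun x => x) with
      | none => respuestas.insert otra []
      | some tope =>
          respuestas.insert otra (((propias.zip pagos).filter (fun p => p.2 == tope)).map (·.1)))
    PySem.Dict.empty).items

-- ===== PRECONDITION & SPEC =====
-- Pre_ excludes exactly the inputs where Python A raises KeyError: some needed
-- (own strategy, opponent strategy) key is absent from the payoff matrix.
def Pre_mejores_respuestas (matriz_pagos : List (String × String × Int × Int)) (jugador : Int) (otras_estrategias : List String) : Prop :=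
  let keys := matriz_pagos.map (fun r => (r.1, r.2.1))
  if jugador = 1 then
    ∀ o ∈ otras_estrategias, ∀ e ∈ matriz_pagos.map (·.1), (e, o) ∈ keys
  else
    ∀ o ∈ otras_estrategias, ∀ e ∈ matriz_pagos.map (·.2.1), (o, e) ∈ keys
instance (matriz_pagos : List (String × String × Int × Int)) (jugador : Int) (otras_estrategias : List String) : Decidable (Pre_mejores_respuestas matriz_pagos jugador otras_estrategias) := by unfold Pre_mejores_respuestas; infer_instance
def pvWitness_mejores_respuestas : (List (String × String × Int × Int)) × Int × List String :=
  ([("a", "x", 1, 2), ("b", "x", 1, 3)], 1, ["x"])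
def Spec_mejores_respuestas (matriz_pagos : List (String × String × Int × Int)) (jugador : Int) (otras_estrategias : List String) (out : List (String × List String)) : Prop := out = mejores_respuestas_alt matriz_pagos jugador otras_estrategias
instance (matriz_pagos : List (String × String × Int × Int)) (jugador : Int) (otras_estrategias : List String) (out : List (String × List String)) : Decidable (Spec_mejores_respuestas matriz_pagos jugador otras_estrategias out) := by unfold Spec_mejores_respuestas; infer_instance

-- ===== CLAIM (what is proved, stated in full; the proofs are below) =====
def Claim_equal_mejores_respuestas : Prop := ∀ (matriz_pagos : List (String × String × Int × Int)) (jugador : Int) (otras_estrategias : List String), Dom_mejores_respuestas matriz_pagos jugador otras_estrategias → Pre_mejores_respuestas matriz_pagos jugador otras_estrategias → Spec_mejores_respuestas matriz_pagos jugador otras_estrategias (mejores_respuestas matriz_pagos jugador otras_estrategias)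

-- ===== LEMMAS AND PROOFS =====

-- folds with pointwise-equal step functions agree
theorem pv_foldl_congr {α β : Type} (g h : β → α → β) (hgh : ∀ d o, g d o = h d o) :
    ∀ (xs : List α) (d : β), xs.foldl g d = xs.foldl h d := by
  intro xs
  induction xs with
  | nil => intro d; rfl
  | cons x t ih => intro d; simp only [List.foldl_cons, hgh]; exact ih _

-- filtering the zip (xs, map f xs) on the payoff component is filtering xs on f
theorem pv_zip_map_filter (f : String → Int) (tope : Int) :
    ∀ xs : List String,
      ((xs.zip (xs.map f)).filter (fun p => p.2 == tope)).map (·.1)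
        = xs.filter (fun e => f e == tope) := by
  intro xs
  induction xs with
  | nil => rfl
  | cons x t ih =>
    by_cases h : f x = tope <;> simp [h, ih]

-- A's running-max/reset accumulator, characterised: once the state is (some v, mej),
-- the final max is the running max M and the list is (mej if v = M) ++ the M-argmaxes
theorem pv_inner_some (f : String → Int) :
    ∀ (xs : List String) (v : Int) (mej : List String),
      xs.foldl (fun (st : Option Int × List String) e =>
        match st with
        | (none, _) => (some (f e), [e])
        | (some w, ms) =>
          if f e > w then (some (f e), [e])
          else if f e = w then (some w, ms ++ [e])
          else (some w, ms)) (some v, mej)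
      = (some (xs.foldl (fun a e => max a (f e)) v),
         (if v = xs.foldl (fun a e => max a (f e)) v then mej else [])
           ++ xs.filter (fun e => f e == xs.foldl (fun a e => max a (f e)) v)) := by
  intro xs
  induction xs with
  | nil => intro v mej; simp
  | cons x t ih =>
    intro v mej
    have hle : ∀ (a : Int), a ≤ t.foldl (fun a e => max a (f e)) a :=
      fun a => (PySem.List.le_foldl_max_int t f a).1
    rcases lt_trichotomy (f x) v with hlt | heq | hgt
    · -- f x < v : state unchanged, max unchanged, x not an argmax
      have hmax : max v (f x) = v := max_eq_left hlt.le
      have hne : (f x == t.foldl (fun a e => max a (f e)) v) = false := by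
        have := hle v
        simp only [beq_eq_false_iff_ne, ne_eq]
        omega
      simp only [List.foldl_cons, hmax, gt_iff_lt, if_neg (not_lt.mpr hlt.le),
        if_neg (ne_of_lt hlt), List.filter_cons, hne]
      exact ih v mej
    · -- f x = v : append x; x is an argmax iff v is the final max
      have hmax : max v (f x) = v := by omega
      simp only [List.foldl_cons, gt_iff_lt, if_neg (by omega : ¬ v < f x), if_pos heq, hmax]
      rw [ih v (mej ++ [x])]
      by_cases hvM : v = t.foldl (fun a e => max a (f e)) v
      · have hx : (f x == t.foldl (fun a e => max a (f e)) v) = true := by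
          simp only [beq_iff_eq]; omega
        simp only [List.filter_cons, hx, if_pos hvM, List.append_assoc,
          List.singleton_append, if_true]
      · have hx : (f x == t.foldl (fun a e => max a (f e)) v) = false := by
          simp only [beq_eq_false_iff_ne, ne_eq]; omega
        simp only [List.filter_cons, hx, if_neg hvM, List.nil_append, if_false,
          Bool.false_eq_true]
    · -- v < f x : reset to [x]
      have hmax : max v (f x) = f x := max_eq_right hgt.le
      simp only [List.foldl_cons, gt_iff_lt, if_pos hgt, hmax]
      rw [ih (f x) [x]]
      have hvne : ¬ v = t.foldl (fun a e => max a (f e)) (f x) := by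
        have := hle (f x); omega
      by_cases hxM : f x = t.foldl (fun a e => max a (f e)) (f x)
      · have hx : (f x == t.foldl (fun a e => max a (f e)) (f x)) = true := by
          simp only [beq_iff_eq]; omega
        simp only [List.filter_cons, hx, if_pos hxM, if_neg hvne, if_true,
          List.nil_append, List.singleton_append]
      · have hx : (f x == t.foldl (fun a e => max a (f e)) (f x)) = false := by
          simp only [beq_eq_false_iff_ne, ne_eq]; omega
        simp only [List.filter_cons, hx, if_neg hxM, if_neg hvne, if_false,
          Bool.false_eq_true, List.nil_append]

-- per-opponent value: A's fused loop = B's map / max / zip-filter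
theorem pv_inner_eq (f : String → Int) (xs : List String) :
    (xs.foldl (fun (st : Option Int × List String) e =>
        match st with
        | (none, _) => (some (f e), [e])
        | (some w, ms) =>
          if f e > w then (some (f e), [e])
          else if f e = w then (some w, ms ++ [e])
          else (some w, ms)) (none, [])).2
      = match PySem.List.max? (xs.map f) (fun x => x) with
        | none => []
        | some tope => ((xs.zip (xs.map f)).filter (fun p => p.2 == tope)).map (·.1) := by
  cases xs with
  | nil => rfl
  | cons x t =>
    simp only [List.map_cons, PySem.List.max?_id_cons, List.foldl_cons]
    rw [pv_inner_some f t (f x) [x], show (f x :: List.map f t) = List.map f (x :: t) from rfl, pv_zip_map_filter]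
    have hM : (t.map f).foldl max (f x) = t.foldl (fun a e => max a (f e)) (f x) := by
      rw [List.foldl_map]
    rw [hM]
    by_cases hx : f x = t.foldl (fun a e => max a (f e)) (f x)
    · have hb : (f x == t.foldl (fun a e => max a (f e)) (f x)) = true := by
        simp only [beq_iff_eq]; omega
      simp only [List.filter_cons, hb, if_pos hx, if_true, List.singleton_append]
    · have hb : (f x == t.foldl (fun a e => max a (f e)) (f x)) = false := by
        simp only [beq_eq_false_iff_ne, ne_eq]; omega
      simp only [List.filter_cons, hb, if_neg hx, if_false, Bool.false_eq_true,
        List.nil_append]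

-- a dict insert distributes over the per-opponent case split
theorem pv_push_insert (d : PySem.Dict String (List String)) (o : String) (M : Option Int)
    (g : Int → List String) :
    d.insert o (match M with | none => [] | some tope => g tope)
      = match M with | none => d.insert o [] | some tope => d.insert o (g tope) := by
  cases M <;> rfl

-- ===== VERDICT (by name: the statement is the Claim_ definition above) =====
theorem mejores_respuestas_spec : Claim_equal_mejores_respuestas := by
  intro m jugador otras _hdom _hpre
  unfold Spec_mejores_respuestas mejores_respuestas mejores_respuestas_alt
  by_cases hj : jugador = 1 <;> simp only [hj, if_pos, if_false]
  · congr 1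
    apply pv_foldl_congr
    intro d o
    rw [pv_inner_eq (fun e1 => ((pvLookup m e1 o).getD (0, 0)).1), pv_push_insert]
  · congr 1
    apply pv_foldl_congr
    intro d o
    rw [pv_inner_eq (fun e2 => ((pvLookup m o e2).getD (0, 0)).2), pv_push_insert]
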